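-- pv_equiv track=rewrite | github.com/PROGRAMMINinGPYTHON/minilogia | logia/neony_po_jakims_czasie.py | neon
-- ===== SOURCE A (Python) =====
-- def neon(tablica):
--     naj = 0
--     pomocnicza = tablica[0]
--     for x in tablica[1:]:
--         pomocnicza += 2
--         naj = max(naj ,pomocnicza+x)
--         pomocnicza = max(pomocnicza,x)
--     return naj
-- ===== SOURCE B (Python) =====
-- def neon(tablica):
--     naj = 0
--     for i, a in enumerate(tablica):
--         for k, b in enumerate(tablica[i+1:], 1):
--             naj = max(naj, a + b + 2*k)
--     return naj
-- ===== Notes on version B (the rewrite author's own statement) =====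
-- stated objective: alternative
-- what changed: Replaces A's single-pass incremental best-prefix accumulator (pomocnicza) with an explicit brute-force double loop over all pairs i<j computing tablica[i]+tablica[j]+2*(j-i); Pre_ excludes only the empty list, on which A raises IndexError.
import Mathlib
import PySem

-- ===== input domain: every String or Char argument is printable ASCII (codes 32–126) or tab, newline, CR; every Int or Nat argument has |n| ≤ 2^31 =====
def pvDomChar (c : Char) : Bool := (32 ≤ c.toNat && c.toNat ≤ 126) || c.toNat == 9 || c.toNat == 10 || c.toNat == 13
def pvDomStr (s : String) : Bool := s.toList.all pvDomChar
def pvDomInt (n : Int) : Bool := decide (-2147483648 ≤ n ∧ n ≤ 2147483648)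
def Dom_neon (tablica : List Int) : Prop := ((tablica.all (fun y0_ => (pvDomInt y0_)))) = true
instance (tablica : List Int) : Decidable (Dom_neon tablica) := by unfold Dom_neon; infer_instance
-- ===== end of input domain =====

-- B replaces A's single-pass incremental accumulator with an explicit brute-force
-- double loop over all pairs i<j (same values, different decomposition; not faster).


-- ===== PORT A =====
-- naj = 0; pomocnicza = tablica[0]; for x in tablica[1:]: pomocnicza += 2;
-- naj = max(naj, pomocnicza + x); pomocnicza = max(pomocnicza, x); return naj
def neon (tablica : List Int) : Int :=
  match PySem.List.pyGet? tablica 0 with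
  | none => 0   -- Python raises IndexError here; excluded by Pre_neon
  | some h =>
    ((PySem.List.slice tablica (some 1) none).foldl
      (fun (st : Int × Int) x =>
        let pomocnicza := st.2 + 2
        (max st.1 (pomocnicza + x), max pomocnicza x)) (0, h)).1

-- ===== PORT B =====
-- naj = 0; for i, a in enumerate(tablica): for k, b in enumerate(tablica[i+1:], 1):
--   naj = max(naj, a + b + 2*k); return naj
def neon_alt (tablica : List Int) : Int :=
  (PySem.List.enumerate tablica 0).foldl
    (fun naj p =>
      (PySem.List.enumerate (PySem.List.slice tablica (some (p.1 + 1)) none) 1).foldl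
        (fun naj q => max naj (p.2 + q.2 + 2 * q.1)) naj) 0

-- ===== PRECONDITION & SPEC =====
-- A raises IndexError on the empty list (tablica[0]); Pre_ excludes exactly that input.
def Pre_neon (tablica : List Int) : Prop := tablica ≠ []
instance (tablica : List Int) : Decidable (Pre_neon tablica) := by unfold Pre_neon; infer_instance
def pvWitness_neon : List Int := [1, -3, 5]

def Spec_neon (tablica : List Int) (out : Int) : Prop := out = neon_alt tablica
instance (tablica : List Int) (out : Int) : Decidable (Spec_neon tablica out) := by unfold Spec_neon; infer_instance

-- ===== CLAIM (what is proved, stated in full; the proofs are below) =====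
def Claim_equal_neon : Prop := ∀ (tablica : List Int), Dom_neon tablica → Pre_neon tablica → Spec_neon tablica (neon tablica)

-- ===== LEMMAS AND PROOFS =====

-- the list of values tablica[i]+tablica[j]+2*(j-i) for a fixed source p = tablica[i]
def rowvals (p : Int) : List Int → List Int
  | [] => []
  | x :: xs => (p + 2 + x) :: rowvals (p + 2) xs

-- outer structural loop of B: process each element as the source over its suffix
def bOuter (naj : Int) : List Int → Int
  | [] => naj
  | a :: t => bOuter (List.foldl max naj (rowvals a t)) t

theorem foldl_max_max (l : List Int) (a b : Int) :
    List.foldl max (max a b) l = max a (List.foldl max b l) := by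
  induction l generalizing b with
  | nil => rfl
  | cons x xs ih =>
    simp only [List.foldl_cons]
    rw [max_assoc, ih]

theorem rowvals_max (xs : List Int) (p q : Int) :
    rowvals (max p q) xs = List.zipWith max (rowvals p xs) (rowvals q xs) := by
  induction xs generalizing p q with
  | nil => rfl
  | cons x xs ih =>
    simp only [rowvals, List.zipWith]
    congr 1
    · omega
    · rw [← ih]; congr 1; omega

theorem length_rowvals (xs : List Int) (p : Int) : (rowvals p xs).length = xs.length := by
  induction xs generalizing p with
  | nil => rfl
  | cons x xs ih => simp [rowvals, ih]

theorem foldl_max_zipWith (as bs : List Int) (h : as.length = bs.length) (n : Int) :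
    List.foldl max n (List.zipWith max as bs) = List.foldl max (List.foldl max n as) bs := by
  induction as generalizing bs n with
  | nil =>
    cases bs with
    | nil => rfl
    | cons b bs => simp at h
  | cons a as ih =>
    cases bs with
    | nil => simp at h
    | cons b bs =>
      simp only [List.zipWith, List.foldl_cons]
      rw [ih _ (by simpa using h)]
      congr 1
      rw [show max n (max a b) = max b (max n a) by omega, foldl_max_max,
          max_comm (List.foldl max (max n a) as) b]

-- A's fold equals B's outer loop seeded with the first source's row
theorem a_fold_eq_bOuter (xs : List Int) (naj p : Int) :
    (xs.foldl (fun (st : Int × Int) x =>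
        (max st.1 (st.2 + 2 + x), max (st.2 + 2) x)) (naj, p)).1
      = bOuter (List.foldl max naj (rowvals p xs)) xs := by
  induction xs generalizing naj p with
  | nil => rfl
  | cons x xs ih =>
    simp only [List.foldl_cons, rowvals, bOuter]
    rw [ih, rowvals_max]
    rw [foldl_max_zipWith _ _ (by rw [length_rowvals, length_rowvals]) _]

-- B's inner loop is a fold of max over rowvals
theorem b_inner_eq (t : List Int) (s naj a : Int) :
    (PySem.List.enumerate t s).foldl (fun naj q => max naj (a + q.2 + 2 * q.1)) naj
      = List.foldl max naj (rowvals (a + 2 * s - 2) t) := by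
  induction t generalizing s naj with
  | nil => rfl
  | cons x xs ih =>
    rw [PySem.List.enumerate_cons]
    simp only [List.foldl_cons, rowvals]
    rw [ih]
    congr 2
    · omega
    · omega

-- B's outer index loop equals the structural outer loop, over any suffix
theorem b_outer_eq (l : List Int) (t : List Int) (s : Nat) (h : l.drop s = t) (naj : Int) :
    (PySem.List.enumerate t (s : Int)).foldl
      (fun naj p =>
        (PySem.List.enumerate (PySem.List.slice l (some (p.1 + 1)) none) 1).foldl
          (fun naj q => max naj (p.2 + q.2 + 2 * q.1)) naj) naj
      = bOuter naj t := by
  induction t generalizing s naj with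
  | nil => rfl
  | cons a t ih =>
    rw [PySem.List.enumerate_cons]
    simp only [List.foldl_cons, bOuter]
    have hdrop : l.drop (s + 1) = t := by
      rw [← List.drop_drop, h]; rfl
    have hslice : PySem.List.slice l (some ((s : Int) + 1)) none = t := by
      rw [show ((s : Int) + 1) = ((s + 1 : Nat) : Int) by push_cast; ring,
          PySem.List.slice_from_natCast, hdrop]
    rw [hslice, b_inner_eq, show ((s : Int) + 1) = ((s + 1 : Nat) : Int) by push_cast; ring,
        ih (s + 1) hdrop]
    rw [show a + 2 * (1 : Int) - 2 = a by ring]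

theorem neon_eq_alt (tablica : List Int) (h : tablica ≠ []) :
    neon tablica = neon_alt tablica := by
  obtain ⟨a, t, rfl⟩ := List.exists_cons_of_ne_nil h
  unfold neon neon_alt
  rw [show PySem.List.pyGet? (a :: t) 0 = some a by
    simp [PySem.List.pyGet?, PySem.List.pyIdx?]]
  simp only [PySem.List.slice_from_one, List.tail_cons]
  have hB := b_outer_eq (a :: t) (a :: t) 0 rfl 0
  simp only [Nat.cast_zero] at hB
  rw [hB]
  simp only [bOuter]
  exact a_fold_eq_bOuter t 0 a

-- ===== VERDICT (by name: the statement is the Claim_ definition above) =====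
theorem neon_spec : Claim_equal_neon := by
  intro tablica _ hpre
  unfold Spec_neon
  exact neon_eq_alt tablica hpre
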